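-- pv_equiv track=rewrite | github.com/golker16/acordes-beatmakingversion | app.py | snap_note_to_pcs_same_octave
-- ===== SOURCE A (Python) =====
-- def snap_note_to_pcs_same_octave(midi_note: int, allowed_pcs: set) -> int:
--     base_oct = midi_note // 12
--     pc = midi_note % 12
--     if pc in allowed_pcs:
--         return midi_note
--     for d in range(1, 6):
--         up = pc + d
--         down = pc - d
--         if 0 <= up <= 11 and up in allowed_pcs:
--             return base_oct * 12 + up
--         if 0 <= down <= 11 and down in allowed_pcs:
--             return base_oct * 12 + down
--     return midi_note
-- ===== SOURCE B (Python) =====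
-- def snap_note_to_pcs_same_octave(midi_note: int, allowed_pcs: set) -> int:
--     base_oct = midi_note // 12
--     pc = midi_note % 12
--     candidates = [p for p in range(12) if p in allowed_pcs and abs(p - pc) <= 5]
--     if not candidates:
--         return midi_note
--     best = min(candidates, key=lambda p: (abs(p - pc), 0 if p > pc else 1))
--     return base_oct * 12 + best
-- ===== Notes on version B (the rewrite author's own statement) =====
-- stated objective: simpler
-- what changed: A's outward search loop over distances 1..5 with early returns is replaced by a single comprehension collecting all allowed pitch classes within distance 5, then a keyed min (distance, prefer-higher) selects the snap target.
import Mathlib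
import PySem

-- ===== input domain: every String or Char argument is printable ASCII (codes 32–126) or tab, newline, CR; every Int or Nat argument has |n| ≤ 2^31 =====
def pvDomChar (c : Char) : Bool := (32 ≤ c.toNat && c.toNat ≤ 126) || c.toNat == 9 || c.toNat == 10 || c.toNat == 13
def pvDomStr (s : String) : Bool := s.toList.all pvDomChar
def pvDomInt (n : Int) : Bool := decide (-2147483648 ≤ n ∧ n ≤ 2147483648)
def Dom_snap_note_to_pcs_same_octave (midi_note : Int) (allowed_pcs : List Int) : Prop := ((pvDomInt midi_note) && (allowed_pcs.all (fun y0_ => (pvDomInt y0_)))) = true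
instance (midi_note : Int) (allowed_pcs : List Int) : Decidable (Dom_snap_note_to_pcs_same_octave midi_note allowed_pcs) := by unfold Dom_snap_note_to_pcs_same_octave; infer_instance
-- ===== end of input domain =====

-- B replaces A's outward search loop (d = 1..5, up then down, early return) by one
-- comprehension over the 12 pitch classes plus a keyed min; objective: simpler/idiomatic.

-- ===== PORT A =====
-- the 'for d in range(1, 6)' loop with its early returns, as structural recursion over the range list
def snapLoopA (midi_note base_oct pc : Int) (allowed_pcs : List Int) : List Int → Int
  | [] => midi_note
  | d :: ds =>
    let up := pc + d
    let down := pc - d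
    if decide (0 ≤ up) && decide (up ≤ 11) && allowed_pcs.contains up then
      base_oct * 12 + up
    else if decide (0 ≤ down) && decide (down ≤ 11) && allowed_pcs.contains down then
      base_oct * 12 + down
    else snapLoopA midi_note base_oct pc allowed_pcs ds

def snap_note_to_pcs_same_octave (midi_note : Int) (allowed_pcs : List Int) : Int :=
  let base_oct := PySem.Int.floordiv midi_note 12
  let pc := PySem.Int.mod midi_note 12
  if allowed_pcs.contains pc then midi_note
  else snapLoopA midi_note base_oct pc allowed_pcs (PySem.List.pyRange 1 6 1)

-- ===== PORT B =====
def snap_note_to_pcs_same_octave_alt (midi_note : Int) (allowed_pcs : List Int) : Int :=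
  let base_oct := PySem.Int.floordiv midi_note 12
  let pc := PySem.Int.mod midi_note 12
  let candidates := (PySem.List.pyRange 0 12 1).filter
    (fun p => allowed_pcs.contains p && decide (|p - pc| ≤ 5))
  match PySem.List.min2? candidates (fun p => |p - pc|) (fun p => if p > pc then (0 : Int) else 1) with
  | none => midi_note
  | some best => base_oct * 12 + best

-- ===== PRECONDITION & SPEC =====
def Spec_snap_note_to_pcs_same_octave (midi_note : Int) (allowed_pcs : List Int) (out : Int) : Prop := out = snap_note_to_pcs_same_octave_alt midi_note allowed_pcs
instance (midi_note : Int) (allowed_pcs : List Int) (out : Int) : Decidable (Spec_snap_note_to_pcs_same_octave midi_note allowed_pcs out) := by unfold Spec_snap_note_to_pcs_same_octave; infer_instance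

-- ===== CLAIM (what is proved, stated in full; the proofs are below) =====
def Claim_equal_snap_note_to_pcs_same_octave : Prop := ∀ (midi_note : Int) (allowed_pcs : List Int), Dom_snap_note_to_pcs_same_octave midi_note allowed_pcs → Spec_snap_note_to_pcs_same_octave midi_note allowed_pcs (snap_note_to_pcs_same_octave midi_note allowed_pcs)

-- ===== LEMMAS AND PROOFS =====

-- A's algorithm on the pitch class alone (membership abstracted as m : Int → Bool)
def coreLoopA (m : Int → Bool) (pc : Int) : List Int → Int
  | [] => pc
  | d :: ds =>
    let up := pc + d
    let down := pc - d
    if decide (0 ≤ up) && decide (up ≤ 11) && m up then up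
    else if decide (0 ≤ down) && decide (down ≤ 11) && m down then down
    else coreLoopA m pc ds

def coreA (m : Int → Bool) (pc : Int) : Int :=
  if m pc then pc else coreLoopA m pc (PySem.List.pyRange 1 6 1)

-- B's algorithm on the pitch class alone
def coreB (m : Int → Bool) (pc : Int) : Int :=
  match PySem.List.min2? ((PySem.List.pyRange 0 12 1).filter (fun p => m p && decide (|p - pc| ≤ 5)))
      (fun p => |p - pc|) (fun p => if p > pc then (0 : Int) else 1) with
  | none => pc
  | some best => best

-- a 12-entry membership table as a function
def tbl (b0 b1 b2 b3 b4 b5 b6 b7 b8 b9 b10 b11 : Bool) (k : Int) : Bool :=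
  if k = 0 then b0 else if k = 1 then b1 else if k = 2 then b2 else if k = 3 then b3
  else if k = 4 then b4 else if k = 5 then b5 else if k = 6 then b6 else if k = 7 then b7
  else if k = 8 then b8 else if k = 9 then b9 else if k = 10 then b10 else if k = 11 then b11
  else false

-- both cores only read m at pitch classes within distance 5 of pc (and inside 0..11)
theorem cond_congr (m m' : Int → Bool) (r : Int)
    (h : ∀ k, 0 ≤ k → k ≤ 11 → |k - r| ≤ 5 → m k = m' k) (x : Int) (hx : |x - r| ≤ 5) :
    (decide (0 ≤ x) && decide (x ≤ 11) && m x) = (decide (0 ≤ x) && decide (x ≤ 11) && m' x) := by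
  by_cases h1 : 0 ≤ x
  · by_cases h2 : x ≤ 11
    · rw [h x h1 h2 hx]
    · simp [h2]
  · simp [h1]

theorem coreLoopA_congr (m m' : Int → Bool) (r : Int)
    (h : ∀ k, 0 ≤ k → k ≤ 11 → |k - r| ≤ 5 → m k = m' k) (ds : List Int)
    (hds : ∀ d ∈ ds, 1 ≤ d ∧ d ≤ 5) : coreLoopA m r ds = coreLoopA m' r ds := by
  induction ds with
  | nil => rfl
  | cons d ds ih =>
    have hd := hds d List.mem_cons_self
    have hup : |r + d - r| ≤ 5 := by rw [abs_le]; omega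
    have hdn : |r - d - r| ≤ 5 := by rw [abs_le]; omega
    simp only [coreLoopA, cond_congr m m' r h _ hup, cond_congr m m' r h _ hdn,
      ih (fun x hx => hds x (List.mem_cons_of_mem d hx))]

theorem coreA_congr (m m' : Int → Bool) (r : Int)
    (h : ∀ k, 0 ≤ k → k ≤ 11 → |k - r| ≤ 5 → m k = m' k) (h0 : 0 ≤ r) (h11 : r ≤ 11) :
    coreA m r = coreA m' r := by
  unfold coreA
  rw [h r h0 h11 (by rw [abs_le]; omega),
    coreLoopA_congr m m' r h _ (fun d hd => by
      have := PySem.List.mem_pyRange_one.1 hd; omega)]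

theorem coreB_congr (m m' : Int → Bool) (r : Int)
    (h : ∀ k, 0 ≤ k → k ≤ 11 → |k - r| ≤ 5 → m k = m' k) : coreB m r = coreB m' r := by
  unfold coreB
  rw [List.filter_congr (fun x hx => by
    have hb := (PySem.List.mem_pyRange_one).1 hx
    by_cases hw : |x - r| ≤ 5
    · rw [h x hb.1 (by omega) hw]
    · simp [hw])]

set_option maxHeartbeats 1600000 in
theorem core_tab0 : ∀ b0 b1 b2 b3 b4 b5 : Bool,
    coreA (tbl b0 b1 b2 b3 b4 b5 false false false false false false) (0 : Int) = coreB (tbl b0 b1 b2 b3 b4 b5 false false false false false false) (0 : Int) := by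
  decide

set_option maxHeartbeats 1600000 in
theorem core_tab1 : ∀ b0 b1 b2 b3 b4 b5 b6 : Bool,
    coreA (tbl b0 b1 b2 b3 b4 b5 b6 false false false false false) (1 : Int) = coreB (tbl b0 b1 b2 b3 b4 b5 b6 false false false false false) (1 : Int) := by
  decide

set_option maxHeartbeats 1600000 in
theorem core_tab2 : ∀ b0 b1 b2 b3 b4 b5 b6 b7 : Bool,
    coreA (tbl b0 b1 b2 b3 b4 b5 b6 b7 false false false false) (2 : Int) = coreB (tbl b0 b1 b2 b3 b4 b5 b6 b7 false false false false) (2 : Int) := by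
  decide

set_option maxHeartbeats 1600000 in
theorem core_tab3 : ∀ b0 b1 b2 b3 b4 b5 b6 b7 b8 : Bool,
    coreA (tbl b0 b1 b2 b3 b4 b5 b6 b7 b8 false false false) (3 : Int) = coreB (tbl b0 b1 b2 b3 b4 b5 b6 b7 b8 false false false) (3 : Int) := by
  decide

set_option maxHeartbeats 1600000 in
theorem core_tab4 : ∀ b0 b1 b2 b3 b4 b5 b6 b7 b8 b9 : Bool,
    coreA (tbl b0 b1 b2 b3 b4 b5 b6 b7 b8 b9 false false) (4 : Int) = coreB (tbl b0 b1 b2 b3 b4 b5 b6 b7 b8 b9 false false) (4 : Int) := by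
  decide

set_option maxHeartbeats 1600000 in
theorem core_tab5 : ∀ b0 b1 b2 b3 b4 b5 b6 b7 b8 b9 b10 : Bool,
    coreA (tbl b0 b1 b2 b3 b4 b5 b6 b7 b8 b9 b10 false) (5 : Int) = coreB (tbl b0 b1 b2 b3 b4 b5 b6 b7 b8 b9 b10 false) (5 : Int) := by
  decide

set_option maxHeartbeats 1600000 in
theorem core_tab6 : ∀ b1 b2 b3 b4 b5 b6 b7 b8 b9 b10 b11 : Bool,
    coreA (tbl false b1 b2 b3 b4 b5 b6 b7 b8 b9 b10 b11) (6 : Int) = coreB (tbl false b1 b2 b3 b4 b5 b6 b7 b8 b9 b10 b11) (6 : Int) := by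
  decide

set_option maxHeartbeats 1600000 in
theorem core_tab7 : ∀ b2 b3 b4 b5 b6 b7 b8 b9 b10 b11 : Bool,
    coreA (tbl false false b2 b3 b4 b5 b6 b7 b8 b9 b10 b11) (7 : Int) = coreB (tbl false false b2 b3 b4 b5 b6 b7 b8 b9 b10 b11) (7 : Int) := by
  decide

set_option maxHeartbeats 1600000 in
theorem core_tab8 : ∀ b3 b4 b5 b6 b7 b8 b9 b10 b11 : Bool,
    coreA (tbl false false false b3 b4 b5 b6 b7 b8 b9 b10 b11) (8 : Int) = coreB (tbl false false false b3 b4 b5 b6 b7 b8 b9 b10 b11) (8 : Int) := by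
  decide

set_option maxHeartbeats 1600000 in
theorem core_tab9 : ∀ b4 b5 b6 b7 b8 b9 b10 b11 : Bool,
    coreA (tbl false false false false b4 b5 b6 b7 b8 b9 b10 b11) (9 : Int) = coreB (tbl false false false false b4 b5 b6 b7 b8 b9 b10 b11) (9 : Int) := by
  decide

set_option maxHeartbeats 1600000 in
theorem core_tab10 : ∀ b5 b6 b7 b8 b9 b10 b11 : Bool,
    coreA (tbl false false false false false b5 b6 b7 b8 b9 b10 b11) (10 : Int) = coreB (tbl false false false false false b5 b6 b7 b8 b9 b10 b11) (10 : Int) := by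
  decide

set_option maxHeartbeats 1600000 in
theorem core_tab11 : ∀ b6 b7 b8 b9 b10 b11 : Bool,
    coreA (tbl false false false false false false b6 b7 b8 b9 b10 b11) (11 : Int) = coreB (tbl false false false false false false b6 b7 b8 b9 b10 b11) (11 : Int) := by
  decide

theorem core_eq (m : Int → Bool) (pc : Int) (h0 : 0 ≤ pc) (h12 : pc < 12) :
    coreA m pc = coreB m pc := by
  interval_cases pc
  · have hag : ∀ k : Int, 0 ≤ k → k ≤ 11 → |k - (0 : Int)| ≤ 5 →
        m k = tbl (m 0) (m 1) (m 2) (m 3) (m 4) (m 5) false false false false false false k := by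
      intro k h1 h2 h3; rw [abs_le] at h3
      have h4 : (0 : Int) ≤ k := by omega
      have h5 : k ≤ (5 : Int) := by omega
      clear h1 h2 h3; interval_cases k <;> rfl
    rw [coreA_congr m _ 0 hag (by norm_num) (by norm_num), coreB_congr m _ 0 hag,
      core_tab0]
  · have hag : ∀ k : Int, 0 ≤ k → k ≤ 11 → |k - (1 : Int)| ≤ 5 →
        m k = tbl (m 0) (m 1) (m 2) (m 3) (m 4) (m 5) (m 6) false false false false false k := by
      intro k h1 h2 h3; rw [abs_le] at h3
      have h4 : (0 : Int) ≤ k := by omega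
      have h5 : k ≤ (6 : Int) := by omega
      clear h1 h2 h3; interval_cases k <;> rfl
    rw [coreA_congr m _ 1 hag (by norm_num) (by norm_num), coreB_congr m _ 1 hag,
      core_tab1]
  · have hag : ∀ k : Int, 0 ≤ k → k ≤ 11 → |k - (2 : Int)| ≤ 5 →
        m k = tbl (m 0) (m 1) (m 2) (m 3) (m 4) (m 5) (m 6) (m 7) false false false false k := by
      intro k h1 h2 h3; rw [abs_le] at h3
      have h4 : (0 : Int) ≤ k := by omega
      have h5 : k ≤ (7 : Int) := by omega
      clear h1 h2 h3; interval_cases k <;> rfl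
    rw [coreA_congr m _ 2 hag (by norm_num) (by norm_num), coreB_congr m _ 2 hag,
      core_tab2]
  · have hag : ∀ k : Int, 0 ≤ k → k ≤ 11 → |k - (3 : Int)| ≤ 5 →
        m k = tbl (m 0) (m 1) (m 2) (m 3) (m 4) (m 5) (m 6) (m 7) (m 8) false false false k := by
      intro k h1 h2 h3; rw [abs_le] at h3
      have h4 : (0 : Int) ≤ k := by omega
      have h5 : k ≤ (8 : Int) := by omega
      clear h1 h2 h3; interval_cases k <;> rfl
    rw [coreA_congr m _ 3 hag (by norm_num) (by norm_num), coreB_congr m _ 3 hag,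
      core_tab3]
  · have hag : ∀ k : Int, 0 ≤ k → k ≤ 11 → |k - (4 : Int)| ≤ 5 →
        m k = tbl (m 0) (m 1) (m 2) (m 3) (m 4) (m 5) (m 6) (m 7) (m 8) (m 9) false false k := by
      intro k h1 h2 h3; rw [abs_le] at h3
      have h4 : (0 : Int) ≤ k := by omega
      have h5 : k ≤ (9 : Int) := by omega
      clear h1 h2 h3; interval_cases k <;> rfl
    rw [coreA_congr m _ 4 hag (by norm_num) (by norm_num), coreB_congr m _ 4 hag,
      core_tab4]
  · have hag : ∀ k : Int, 0 ≤ k → k ≤ 11 → |k - (5 : Int)| ≤ 5 →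
        m k = tbl (m 0) (m 1) (m 2) (m 3) (m 4) (m 5) (m 6) (m 7) (m 8) (m 9) (m 10) false k := by
      intro k h1 h2 h3; rw [abs_le] at h3
      have h4 : (0 : Int) ≤ k := by omega
      have h5 : k ≤ (10 : Int) := by omega
      clear h1 h2 h3; interval_cases k <;> rfl
    rw [coreA_congr m _ 5 hag (by norm_num) (by norm_num), coreB_congr m _ 5 hag,
      core_tab5]
  · have hag : ∀ k : Int, 0 ≤ k → k ≤ 11 → |k - (6 : Int)| ≤ 5 →
        m k = tbl false (m 1) (m 2) (m 3) (m 4) (m 5) (m 6) (m 7) (m 8) (m 9) (m 10) (m 11) k := by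
      intro k h1 h2 h3; rw [abs_le] at h3
      have h4 : (1 : Int) ≤ k := by omega
      have h5 : k ≤ (11 : Int) := by omega
      clear h1 h2 h3; interval_cases k <;> rfl
    rw [coreA_congr m _ 6 hag (by norm_num) (by norm_num), coreB_congr m _ 6 hag,
      core_tab6]
  · have hag : ∀ k : Int, 0 ≤ k → k ≤ 11 → |k - (7 : Int)| ≤ 5 →
        m k = tbl false false (m 2) (m 3) (m 4) (m 5) (m 6) (m 7) (m 8) (m 9) (m 10) (m 11) k := by
      intro k h1 h2 h3; rw [abs_le] at h3
      have h4 : (2 : Int) ≤ k := by omega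
      have h5 : k ≤ (11 : Int) := by omega
      clear h1 h2 h3; interval_cases k <;> rfl
    rw [coreA_congr m _ 7 hag (by norm_num) (by norm_num), coreB_congr m _ 7 hag,
      core_tab7]
  · have hag : ∀ k : Int, 0 ≤ k → k ≤ 11 → |k - (8 : Int)| ≤ 5 →
        m k = tbl false false false (m 3) (m 4) (m 5) (m 6) (m 7) (m 8) (m 9) (m 10) (m 11) k := by
      intro k h1 h2 h3; rw [abs_le] at h3
      have h4 : (3 : Int) ≤ k := by omega
      have h5 : k ≤ (11 : Int) := by omega
      clear h1 h2 h3; interval_cases k <;> rfl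
    rw [coreA_congr m _ 8 hag (by norm_num) (by norm_num), coreB_congr m _ 8 hag,
      core_tab8]
  · have hag : ∀ k : Int, 0 ≤ k → k ≤ 11 → |k - (9 : Int)| ≤ 5 →
        m k = tbl false false false false (m 4) (m 5) (m 6) (m 7) (m 8) (m 9) (m 10) (m 11) k := by
      intro k h1 h2 h3; rw [abs_le] at h3
      have h4 : (4 : Int) ≤ k := by omega
      have h5 : k ≤ (11 : Int) := by omega
      clear h1 h2 h3; interval_cases k <;> rfl
    rw [coreA_congr m _ 9 hag (by norm_num) (by norm_num), coreB_congr m _ 9 hag,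
      core_tab9]
  · have hag : ∀ k : Int, 0 ≤ k → k ≤ 11 → |k - (10 : Int)| ≤ 5 →
        m k = tbl false false false false false (m 5) (m 6) (m 7) (m 8) (m 9) (m 10) (m 11) k := by
      intro k h1 h2 h3; rw [abs_le] at h3
      have h4 : (5 : Int) ≤ k := by omega
      have h5 : k ≤ (11 : Int) := by omega
      clear h1 h2 h3; interval_cases k <;> rfl
    rw [coreA_congr m _ 10 hag (by norm_num) (by norm_num), coreB_congr m _ 10 hag,
      core_tab10]
  · have hag : ∀ k : Int, 0 ≤ k → k ≤ 11 → |k - (11 : Int)| ≤ 5 →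
        m k = tbl false false false false false false (m 6) (m 7) (m 8) (m 9) (m 10) (m 11) k := by
      intro k h1 h2 h3; rw [abs_le] at h3
      have h4 : (6 : Int) ≤ k := by omega
      have h5 : k ≤ (11 : Int) := by omega
      clear h1 h2 h3; interval_cases k <;> rfl
    rw [coreA_congr m _ 11 hag (by norm_num) (by norm_num), coreB_congr m _ 11 hag,
      core_tab11]

theorem loopA_bridge (q pc : Int) (allowed : List Int) (ds : List Int) :
    snapLoopA (12 * q + pc) q pc allowed ds
      = 12 * q + coreLoopA (fun k => allowed.contains k) pc ds := by
  induction ds with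
  | nil => simp [snapLoopA, coreLoopA]
  | cons d ds ih =>
    simp only [snapLoopA, coreLoopA, ih]
    split_ifs <;> ring

theorem snap_decomp (q pc : Int) (h0 : 0 ≤ pc) (h12 : pc < 12) (allowed : List Int) :
    snap_note_to_pcs_same_octave (12 * q + pc) allowed
      = 12 * q + coreA (fun k => allowed.contains k) pc := by
  have hf : PySem.Int.floordiv (12 * q + pc) 12 = q := by
    rw [PySem.Int.floordiv_eq_ediv_of_pos (by norm_num)]; omega
  have hm : PySem.Int.mod (12 * q + pc) 12 = pc := by
    rw [PySem.Int.mod_eq_emod_of_pos (by norm_num)]; omega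
  unfold snap_note_to_pcs_same_octave coreA
  simp only [hf, hm]
  split_ifs with hc
  · ring
  · exact loopA_bridge q pc allowed _

theorem snap_alt_decomp (q pc : Int) (h0 : 0 ≤ pc) (h12 : pc < 12) (allowed : List Int) :
    snap_note_to_pcs_same_octave_alt (12 * q + pc) allowed
      = 12 * q + coreB (fun k => allowed.contains k) pc := by
  have hf : PySem.Int.floordiv (12 * q + pc) 12 = q := by
    rw [PySem.Int.floordiv_eq_ediv_of_pos (by norm_num)]; omega
  have hm : PySem.Int.mod (12 * q + pc) 12 = pc := by
    rw [PySem.Int.mod_eq_emod_of_pos (by norm_num)]; omega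
  unfold snap_note_to_pcs_same_octave_alt coreB
  simp only [hf, hm]
  cases PySem.List.min2? ((PySem.List.pyRange 0 12 1).filter
      (fun p => allowed.contains p && decide (|p - pc| ≤ 5)))
      (fun p => |p - pc|) (fun p => if p > pc then (0 : Int) else 1) with
  | none => ring
  | some best => ring

-- ===== VERDICT (by name: the statement is the Claim_ definition above) =====
theorem snap_note_to_pcs_same_octave_spec : Claim_equal_snap_note_to_pcs_same_octave := by
  intro midi allowed _
  unfold Spec_snap_note_to_pcs_same_octave
  have h : midi = 12 * (midi / 12) + midi % 12 := by omega
  have h0 : 0 ≤ midi % 12 := Int.emod_nonneg _ (by norm_num)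
  have h12 : midi % 12 < 12 := by omega
  rw [h, snap_decomp _ _ h0 h12, snap_alt_decomp _ _ h0 h12,
    core_eq _ _ h0 h12]
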